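-- pv_equiv track=rewrite | github.com/Philin-coder/Pyrepo | .github/Сумму элементов, расположенных до последнего положительного элемента. Сжать массив, удалив из него все элементы, модуль которых находится в интервале [a, b]. Освободившиеся в конце массива элементы заполнить нулями.py | some1
-- ===== SOURCE A (Python) =====
-- def some1(lst):
--     res = 0
--     found = False
--     for i in lst[::-1]:
--         if found:
--             res = res + i
--         else:
--             found = i > 0
--     return res
-- ===== SOURCE B (Python) =====
-- def some1(lst):
--     idx = -1
--     for i, x in enumerate(lst):
--         if x > 0:
--             idx = i
--     if idx < 0:
--         return 0
--     total = 0
--     for x in reversed(lst[:idx]):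
--         total = total + x
--     return total
-- ===== Notes on version B (the rewrite author's own statement) =====
-- stated objective: alternative
-- what changed: A's single fused reverse scan with a found-flag is replaced by a two-pass locate-then-aggregate: a forward enumerate pass records the last positive index, then the prefix before it is summed (in reverse order, matching A's accumulation order).
import Mathlib
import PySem

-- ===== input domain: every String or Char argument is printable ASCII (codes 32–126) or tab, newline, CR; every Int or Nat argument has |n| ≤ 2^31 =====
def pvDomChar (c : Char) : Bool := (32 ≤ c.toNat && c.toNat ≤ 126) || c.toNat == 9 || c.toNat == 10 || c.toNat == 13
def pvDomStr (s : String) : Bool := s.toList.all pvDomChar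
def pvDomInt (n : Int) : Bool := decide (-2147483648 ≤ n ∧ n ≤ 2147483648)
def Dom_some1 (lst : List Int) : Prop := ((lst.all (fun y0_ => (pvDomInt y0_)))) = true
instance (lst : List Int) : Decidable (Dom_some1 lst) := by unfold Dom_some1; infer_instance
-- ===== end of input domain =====

-- B replaces A's fused reverse-scan-with-flag by a locate-last-positive pass followed by a prefix sum (alternative decomposition, same cost).


-- ===== PORT A =====
def some1 (lst : List Int) : Int :=
  (((PySem.List.slice? lst none none (-1)).getD []).foldl
    (fun (s : Int × Bool) i => if s.2 then (s.1 + i, s.2) else (s.1, decide (i > 0)))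
    (0, false)).1

-- ===== PORT B =====
def some1_alt (lst : List Int) : Int :=
  let idx : Int := (PySem.List.enumerate lst 0).foldl
    (fun acc p => if p.2 > 0 then p.1 else acc) (-1)
  if idx < 0 then 0
  else (PySem.List.slice lst none (some idx)).reverse.foldl (fun t x => t + x) 0

-- ===== PRECONDITION & SPEC =====
def Spec_some1 (lst : List Int) (out : Int) : Prop := out = some1_alt lst
instance (lst : List Int) (out : Int) : Decidable (Spec_some1 lst out) := by unfold Spec_some1; infer_instance

-- ===== CLAIM (what is proved, stated in full; the proofs are below) =====
def Claim_equal_some1 : Prop := ∀ (lst : List Int), Dom_some1 lst → Spec_some1 lst (some1 lst)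

-- ===== LEMMAS AND PROOFS =====

-- common specification: on the reversed list, skip until the first positive, then sum the rest
def pvG : List Int → Int
  | [] => 0
  | i :: r => if 0 < i then r.sum else pvG r

theorem pvA_found (r : List Int) : ∀ res : Int,
    (r.foldl (fun (s : Int × Bool) i => if s.2 then (s.1 + i, s.2) else (s.1, decide (i > 0)))
      (res, true)).1 = res + r.sum := by
  induction r with
  | nil => intro res; simp
  | cons i r ih => intro res; simp [List.foldl, ih, List.sum_cons]; ring

theorem pvA_loop (r : List Int) :
    (r.foldl (fun (s : Int × Bool) i => if s.2 then (s.1 + i, s.2) else (s.1, decide (i > 0)))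
      (0, false)).1 = pvG r := by
  induction r with
  | nil => rfl
  | cons i r ih =>
    by_cases h : 0 < i
    · simp [List.foldl, h, pvG, pvA_found]
    · simp [List.foldl, h, pvG, ih]

theorem pvA_eq (lst : List Int) : some1 lst = pvG lst.reverse := by
  unfold some1
  rw [PySem.List.slice?_none_none_neg_one]
  exact pvA_loop lst.reverse

def pvIdx (lst : List Int) : Int :=
  (PySem.List.enumerate lst 0).foldl (fun acc p => if p.2 > 0 then p.1 else acc) (-1)

theorem pvIdx_append (lst : List Int) (x : Int) :
    pvIdx (lst ++ [x]) = if x > 0 then (lst.length : Int) else pvIdx lst := by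
  unfold pvIdx
  rw [PySem.List.enumerate_append, List.foldl_append]
  simp [PySem.List.enumerate, List.foldl]

theorem pvIdx_range (lst : List Int) : pvIdx lst = -1 ∨ (0 ≤ pvIdx lst ∧ pvIdx lst < lst.length) := by
  induction lst using List.reverseRecOn with
  | nil => left; rfl
  | append_singleton l x ih =>
    rw [pvIdx_append]
    by_cases h : x > 0
    · right
      rw [if_pos h]
      constructor
      · omega
      · simp only [List.length_append, List.length_cons, List.length_nil]
        push_cast; omega
    · rw [if_neg h]
      rcases ih with h1 | ⟨h1, h2⟩
      · left; exact h1
      · right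
        refine ⟨h1, ?_⟩
        simp only [List.length_append, List.length_cons, List.length_nil]
        push_cast; omega

theorem pvB_sum (l : List Int) : l.reverse.foldl (fun t x => t + x) 0 = l.sum := by
  have key : ∀ (m : List Int) (a : Int), m.foldl (fun t x => t + x) a = a + m.sum := by
    intro m; induction m with
    | nil => simp
    | cons y m ih => intro a; simp only [List.foldl, ih, List.sum_cons]; ring
  rw [key]; simp [List.sum_reverse]

theorem pvB_eq (lst : List Int) : some1_alt lst = pvG lst.reverse := by
  induction lst using List.reverseRecOn with
  | nil => rfl
  | append_singleton l x ih =>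
    unfold some1_alt
    show (if pvIdx (l ++ [x]) < 0 then 0
      else (PySem.List.slice (l ++ [x]) none (some (pvIdx (l ++ [x])))).reverse.foldl
        (fun t x => t + x) 0) = _
    rw [pvIdx_append, List.reverse_append,
      show ([x] : List Int).reverse ++ l.reverse = x :: l.reverse by simp]
    by_cases h : x > 0
    · rw [if_pos h, if_neg (by omega : ¬ ((l.length : Int) < 0)),
        PySem.List.slice_to_natCast, List.take_left, pvB_sum,
        show pvG (x :: l.reverse) = l.reverse.sum from by simp [pvG, h],
        List.sum_reverse]
    · rw [if_neg h, show pvG (x :: l.reverse) = pvG l.reverse from by simp [pvG, h], ← ih]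
      unfold some1_alt
      show _ = (if pvIdx l < 0 then 0
        else (PySem.List.slice l none (some (pvIdx l))).reverse.foldl (fun t x => t + x) 0)
      rcases pvIdx_range l with h1 | ⟨h1, h2⟩
      · rw [h1]; rfl
      · have hn : ¬ pvIdx l < 0 := by omega
        rw [if_neg hn, if_neg hn, PySem.List.slice_to (l ++ [x]) h1, PySem.List.slice_to l h1,
          List.take_append_of_le_length (by omega)]

-- ===== VERDICT (by name: the statement is the Claim_ definition above) =====
theorem some1_spec : Claim_equal_some1 := by
  intro lst _
  unfold Spec_some1
  rw [pvA_eq, pvB_eq]
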